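-- pv_equiv track=rewrite | github.com/owenjchen/acsl_python | sumaddle_puzzle_v2.py | check_blocksum
-- ===== SOURCE A (Python) =====
-- def check_blocksum(row, s):
--     n = len(row)
--     blocksum = 0
--     found = False
--     for i in range(n):
--         if not found:
--             if row[i] == 0:
--                 found = True
--         elif row[i] > 0:
--             blocksum +=row[i]
--         else:
--             break
--     return s == blocksum
-- ===== SOURCE B (Python) =====
-- def check_blocksum(row, s):
--     # locate the first zero, then sum the leading positive run of the suffix
--     try:
--         start = row.index(0) + 1
--     except ValueError:
--         return s == 0
--     rest = row[start:]
--     k = 0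
--     while k < len(rest) and rest[k] > 0:
--         k += 1
--     return s == sum(rest[:k])
-- ===== Notes on version B (the rewrite author's own statement) =====
-- stated objective: simpler
-- what changed: Replaces the single stateful loop with a found-flag and break by a locate-then-scan decomposition: find the first zero with list.index, then sum the leading positive run of the suffix.
import Mathlib
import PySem

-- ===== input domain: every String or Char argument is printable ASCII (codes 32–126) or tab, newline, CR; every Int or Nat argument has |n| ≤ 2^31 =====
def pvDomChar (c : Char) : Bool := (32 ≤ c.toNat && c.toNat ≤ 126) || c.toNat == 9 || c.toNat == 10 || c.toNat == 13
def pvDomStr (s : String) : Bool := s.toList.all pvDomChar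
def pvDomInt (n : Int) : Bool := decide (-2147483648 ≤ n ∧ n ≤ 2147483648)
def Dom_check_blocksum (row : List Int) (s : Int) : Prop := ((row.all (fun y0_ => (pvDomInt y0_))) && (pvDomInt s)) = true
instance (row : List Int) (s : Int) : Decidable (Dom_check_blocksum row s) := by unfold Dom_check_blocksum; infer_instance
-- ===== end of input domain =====

-- B replaces A's stateful found-flag loop with locate-the-first-zero then sum the leading positive run (simpler decomposition, same O(n) cost).

-- ===== PORT A =====
-- the for-loop over row with state (blocksum, found); 'break' returns the accumulator
def checkLoopA : List Int → Int → Bool → Int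
  | [], blocksum, _ => blocksum
  | x :: xs, blocksum, found =>
    if !found then checkLoopA xs blocksum (x == 0)
    else if x > 0 then checkLoopA xs (blocksum + x) found
    else blocksum

def check_blocksum (row : List Int) (s : Int) : Bool :=
  s == checkLoopA row 0 false

-- ===== PORT B =====
def check_blocksum_alt (row : List Int) (s : Int) : Bool :=
  match PySem.List.index? row 0 with
  | none => s == 0
  | some i =>
    let rest := PySem.List.slice row (some ((i : Int) + 1)) none
    -- the while loop finds the end of the leading positive run; sum of that prefix
    s == (rest.takeWhile (fun x => 0 < x)).sum

-- ===== PRECONDITION & SPEC =====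
def Spec_check_blocksum (row : List Int) (s : Int) (out : Bool) : Prop := out = check_blocksum_alt row s
instance (row : List Int) (s : Int) (out : Bool) : Decidable (Spec_check_blocksum row s out) := by unfold Spec_check_blocksum; infer_instance

-- ===== CLAIM (what is proved, stated in full; the proofs are below) =====
def Claim_equal_check_blocksum : Prop := ∀ (row : List Int) (s : Int), Dom_check_blocksum row s → Spec_check_blocksum row s (check_blocksum row s)

-- ===== LEMMAS AND PROOFS =====
theorem checkLoopA_found (xs : List Int) (acc : Int) :
    checkLoopA xs acc true = acc + (xs.takeWhile (fun x => 0 < x)).sum := by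
  induction xs generalizing acc with
  | nil => simp [checkLoopA]
  | cons x xs ih =>
    by_cases hx : 0 < x
    · simp [checkLoopA, hx, ih]
      ring
    · simp [checkLoopA, hx]

theorem checkLoopA_notfound (xs : List Int) (acc : Int) :
    checkLoopA xs acc false =
      match PySem.List.index? xs 0 with
      | none => acc
      | some i => acc + ((xs.drop (i + 1)).takeWhile (fun x => 0 < x)).sum := by
  induction xs generalizing acc with
  | nil => simp [checkLoopA, PySem.List.index?]
  | cons x xs ih =>
    by_cases hx : x = 0
    · subst hx
      rw [PySem.List.index?_cons_self]
      simpa [checkLoopA] using checkLoopA_found xs acc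
    · rw [PySem.List.index?_cons_of_ne _ hx]
      have : checkLoopA (x :: xs) acc false = checkLoopA xs acc false := by
        simp only [checkLoopA]
        rw [show (x == (0 : Int)) = false from by simp [hx]]
        simp
      rw [this, ih]
      cases h : PySem.List.index? xs 0 with
      | none => simp
      | some i => simp [List.drop]

-- ===== VERDICT (by name: the statement is the Claim_ definition above) =====
theorem check_blocksum_spec : Claim_equal_check_blocksum := by
  intro row s _
  unfold Spec_check_blocksum check_blocksum check_blocksum_alt
  rw [checkLoopA_notfound]
  cases h : PySem.List.index? row 0 with
  | none => simp
  | some i =>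
    have h1 : PySem.List.slice row (some ((i : Int) + 1)) none = row.drop (i + 1) := by
      rw [show ((i : Int) + 1) = ((i + 1 : Nat) : Int) from by push_cast; ring]
      exact PySem.List.slice_from_natCast row (i + 1)
    simp [h1]
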